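/- GENERATED by tools/from_farm_form.py from prooffarm-gif/accepted/DGifGetImageDesc.5/Lemmas.lean (a worked proof of the farm's unit `DGifGetImageDesc.5`,
   accepted by the verdict) — do not edit. -/
import Gif.Spec.Units.DGifGetImageDesc_5
import Gif.Spec.AllSegs

/-!
  Lemmas for the unit `DGifGetImageDesc.5` (0x109535 … 0x109583 and 0x10961e … 0x109638; dgif_lib.c:463-470): the deep copy of the
  local colour map into the uncounted slot of the SavedImages array. The segment is walked in pieces that meet at the return
  address of `GifMakeMapObject`, 0x10956a (`ret14`), with a private assertion there; the case split on "is there a local map"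
  (`Fc.icm`) and on "did the copy succeed" (the map `cm` of `seg5_AtRet14.res`) is made BEFORE each walk, so that the walker prunes
  the other arm of `test r12, r12 ; je`.

      seg5_null          0x109535 … `je` taken … 0x109583              `Fc.icm = none`: `AfterCopy` → `Slot` (`cm = none`, the same heap)
      seg5_through_make  `Shape`, `rem`, `LZOK` through GifMakeMapObject's footprint (cell, above the bump pointer, shadow) and stack
      seg5_AtRet14       the assertion at `ret14`: `Mid` for the grown heap `H'`, `rbp = sp`, the result `rax` as a map `cm`
      seg5_call          0x109535 … the call … 0x10956a                `Fc.icm = some mp`: `AfterCopy` → `seg5_AtRet14`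
      seg5_store_slot    a store into the uncounted slot keeps `HeapInv`, `GifOK`, `rem`, `LZOK`
      seg5_lz_stack      `LZOK` through a stack store
      seg5_tail_map      0x10956a … 0x109583                            `cm = some m`: → `Slot` (the heap `H'` holds the copy)
      seg5_tail_null     0x10956a … 0x10961e … 0x10949a                 `cm = none`: → `Done` (GIF_ERROR, the slot is not counted)

  The general lemmas used: Gif/Spec/FrameCarry.lean §5 (`store_stack`, `store_gif`), Carry.lean §3 (`Loose.savedTail`, `rem_loose`),
  Common.lean §5 (`Shape.sameExcept`, `Loose.cell / .above / .shadow / .stack`), CommonMore.lean (`Owns.grew`, `Owns.cons_grew`).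
-/

open X86 X86.User Asan ProgX.Base ProgX.Base.Spec Gif.Spec

set_option maxRecDepth 4000
set_option maxHeartbeats 4000000

namespace Gif.Spec.DGifGetImageDesc_5

/-- **109535H … 109583H when there is no local colour map** (dgif_lib.c:463 `if (GifFile->Image.ColorMap != NULL)` is false): the
checked load of `gif.Image.ColorMap` gives 0, `je` is taken. The slot's map is `none` (the copied field is 0), the heap and the
forest do not change. -/
theorem seg5_null (Lay : Layout) (hLay : Lay.hi = 0x1000000) (μ : Microarch) (hμ : UserX.MicroOK μ) (u₀ : State)
    (hcode : HasCodeNat Lay u₀ Gif.L.DGifGetImageDesc.entry Gif.Code.code_DGifGetImageDesc.nat Gif.L.DGifGetImageDesc.size)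
    (h_asan_load8_noabort : Asan.SmallCheck Lay μ ProgX.Base.WayInv (ProgX.Base.CodeOK u₀) [.rax, .rcx, .rdx] 8
      ProgX.Base.L.__asan_load8_noabort.entry)
    (H : Heap) (rest : List Obj) (frames : List (Nat × FrameLayout)) (F : Forest) (R : Rd) (e : State) (ret : Word)
    (Hc : Heap) (Fc : Forest) (v : State)
    (hat : DGifGetImageDesc.AfterCopy H rest frames F R Hc Fc u₀ e ret v) (hnone : Fc.icm = none) :
    ReachVia Lay μ ProgX.Base.WayInv v (fun w =>
      (∃ (H' : Heap), DGifGetImageDesc.Slot H rest frames F R H' Fc u₀ e ret w) ∨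
      (∃ (H' : Heap), DGifGetImageDesc.Done H rest frames F R H' Fc u₀ e ret w)) := by
  -- THE PRELUDE
  obtain ⟨hmid, s, hsaved, hroom, c_rbpn, hslot⟩ := hat
  obtain ⟨hbody, himgs, hlz⟩ := hmid
  have he := hbody.entry
  v_entry he
  obtain ⟨henv, hrdi⟩ := hbody.pre
  have w_rip := hbody.rip
  have c_rsp : v.reg .rsp = e.reg .rsp - 40 := hbody.rsp
  have c_rbx : v.reg .rbx = e.reg .rdi := hbody.rbx
  have w_kept : RegsKept [.rsp] v v := RegsKept.refl _ _
  have w_eq : Mem.EqOn ProgX.Base.L.textLo ProgX.Base.L.textHi u₀.mem v.mem := ProgX.Base.conv_code_eqOn hbody.code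
  have hdf := (show abiInv _ from hbody.abi).1
  have hmx := (show abiInv _ from hbody.abi).2
  have hsse := ProgX.Base.sseOK_of_abiInv hbody.abi
  have k_r13 : v.mem.readLE (e.reg .rsp - 8) 8 = (e.reg .r13).toNat := hbody.slot_r13
  have k_r12 : v.mem.readLE (e.reg .rsp - 16) 8 = (e.reg .r12).toNat := hbody.slot_r12
  have k_rbp : v.mem.readLE (e.reg .rsp - 24) 8 = (e.reg .rbp).toNat := hbody.slot_rbp
  have k_rbx : v.mem.readLE (e.reg .rsp - 32) 8 = (e.reg .rbx).toNat := hbody.slot_rbx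
  have k_ra : UInt64.ofNat (v.mem.readLE (e.reg .rsp) 8) = ret := hbody.slot_ra
  have hsame : Mem.SameExcept
    [⟨(e.reg .rsp).toNat - 496, (e.reg .rsp).toNat⟩,
     ⟨0x800000, 0x1000020⟩,
     ⟨R.cur, R.cur + 8⟩] e.mem v.mem := hbody.same
  -- where the cursor and gif are, as numbers
  have hcur := henv.ctx.cursor_range henv.heap.inv.shadow
  have hgin := hbody.ok.owns.inside hbody.inv.heap (o := (Fc.gif, 120)) List.mem_cons_self
  have hbase : Hc.base = 0x800000 := hbody.region.1.trans henv.heap.base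
  have hgif : Fc.gif = F.gif := hbody.forest.1
  simp only at hgin
  rw [hbase, hgif] at hgin
  have hg1 := hgin.1
  have hg2 := hgin.2.2.2.2
  clear hgin
  -- the load of `gif.Image.ColorMap`: 0
  have hicm := hbody.ok.shape.icm
  rw [hnone] at hicm
  have hicm0 : GifFileType.Image.ColorMap v.mem Fc.gif = 0 := hicm
  have hicm' := hicm0
  simp only [gfield] at hicm'
  rw [hgif] at hicm'
  have l_icm : v.mem.readLE (e.reg .rdi + 0x40) 8 = 0 := by
    rw [rd_eq_readLE v.mem _ (F.gif + 64) 8 (by u_omega)]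
    exact hicm'
  have hgl : LiveIn (Hc.liveObjs ++ rest) frames F.gif 120 := by
    rw [← hgif]
    exact hbody.ok.gif_live.liveIn rest _ (Nat.le_refl _) (Nat.le_refl _)
  u_walk hcode [hμ.vendor] until [Gif.L.DGifGetImageDesc.at_109583, Gif.L.DGifGetImageDesc.at_10949a]
    span [ProgX.Base.L.textLo, ProgX.Base.L.textHi] side (v_side)
  case check_109539 =>
    -- dgif_lib.c:463 the load of `gif.Image.ColorMap`: 8 bytes inside gif
    have hun : ShadowUntouched v.mem s_109539.mem := by v_untouched
    exact hgl.accSmall hbody.inv.shadow hun _ 8 (by decide) (by u_omega) (by u_omega)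
  -- 0x109583 FROM 0x109545: the only store since `v` is the check call's return address
  obtain ⟨hinvA, hokA, hremA⟩ := store_stack hbody.inv hbody.ok ⟨hcur.1, hcur.2.1⟩ (e.reg .rsp - 48) 8 1086782
    (by u_omega) (by u_omega)
  have hs1 : Mem.SameExcept [⟨(e.reg .rsp).toNat - 48, (e.reg .rsp).toNat - 40⟩] v.mem s_109545.mem := by
    rw [w_mem]
    u_same
  rw [← w_mem] at hinvA hokA hremA
  have hpv := hbody.ok.owns.inside hbody.inv.heap (o := (Fc.pv, 24936)) (List.mem_cons_of_mem _ List.mem_cons_self)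
  have hpveq : Fc.pv = F.pv := hbody.forest.2.1
  simp only at hpv
  rw [hbase, hpveq] at hpv
  have hp1 := hpv.1
  have hp2 := hpv.2.2.2.2
  clear hpv
  have hsin := hbody.ok.owns.inside hbody.inv.heap (o := (s.arr, 56 * s.cap)) (by
    apply Forest.mem_owned_saved
    rw [hsaved]
    exact List.mem_cons_self)
  simp only at hsin
  rw [hbase] at hsin
  have hs1' := hsin.1
  have hs2' := hsin.2.2.2.2
  clear hsin
  have hat1 : DGifGetImageDesc.At Gif.L.DGifGetImageDesc.at_109583 H rest frames F R Hc Fc u₀ e ret s_109545 := {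
    entry := hbody.entry
    pre := hbody.pre
    rip := w_rip
    rsp := w_rsp
    rbx := (w_kept.get .rbx rfl).trans hbody.rbx
    r14 := (w_kept.get .r14 rfl).trans hbody.r14
    r15 := (w_kept.get .r15 rfl).trans hbody.r15
    slot_r13 := by
      rw [w_mem]
      u_frame k_r13
    slot_r12 := by
      rw [w_mem]
      u_frame k_r12
    slot_rbp := by
      rw [w_mem]
      u_frame k_rbp
    slot_rbx := by
      rw [w_mem]
      u_frame k_rbx
    slot_ra := by
      rw [w_mem]
      u_frame k_ra
    inv := hinvA
    region := hbody.region
    forest := hbody.forest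
    ok := hokA
    rem := by
      rw [hremA]
      exact hbody.rem
    same := by
      rw [w_mem]
      u_same
    code := ProgX.Base.conv_code_in w_eq
    abi := by
      refine ProgX.Base.abiInv_of ?_ ?_
      · rw [w_flags]
        simp only [X86.User.df_setStatus]
        exact w_df_109539
      · rw [w_mxcsr]
        exact hmx
  }
  refine ReachVia.done (Or.inl ⟨Hc, ?_⟩)
  refine ⟨⟨hat1, himgs, ?_⟩, s, none, hsaved, hroom, ?_, ?_, hbody.ok.owns⟩
  · -- `LZOK`: the store went to the stack
    apply hlz.sameExcept hs1 (by omega)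
    intro w hw
    have ew := List.mem_singleton.mp hw
    rw [ew]
    simp only
    omega
  · rw [w_kept.get .rbp rfl]
    exact c_rbpn
  · -- the slot's field is the copied 0
    show SavedImage.ImageDesc.ColorMap s_109545.mem (s.arr + 56 * s.imgs.length) = 0
    rw [← hicm0, ← hslot]
    simp only [gfield]
    apply hs1.rd _ _ (by omega)
    intro w hw
    have ew := List.mem_singleton.mp hw
    rw [ew]
    simp only
    omega

/-- **The state invariant's shape, the reader's measure and the LZW ranges through `GifMakeMapObject`'s footprint** (and the stack
below `top`): the control cell, everything at or above the old bump pointer's header, the shadow — nothing the forest reads. -/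
theorem seg5_through_make {Hc : Heap} {Fc : Forest} {R : Rd} {mem mem' : Mem} {lo top pv : Nat}
    (hok : GifOK Hc Fc R mem) (hheap : HeapOK Hc mem) (hbase : Hc.base = 0x800000) (hlimit : Hc.limit = 0xC00000)
    (hcur : 0x700000 ≤ R.cur ∧ R.cur + 16 ≤ 0x800000) (hlo : 0x700000 ≤ lo) (htop : top ≤ R.cur)
    (hpv0 : 0x800040 ≤ pv) (hpv : pv + 24936 + 32 ≤ Hc.base + 32 + Hc.used) (hlz : LZOK mem pv)
    (hs : Mem.SameExcept
      [⟨lo, top⟩,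
       ⟨0x800000, 0x800008⟩,
       ⟨Hc.next - 32, 0xC00000⟩,
       shadowSpan (Hc.next - 32) 0xC00000] mem mem') :
    Shape Fc R mem' ∧ rem R mem' = rem R mem ∧ LZOK mem' pv := by
  have hnext := Heap.next_def Hc
  have hroom := hheap.room
  refine ⟨?_, ?_, ?_⟩
  · apply hok.shape.sameExcept (hok.owns.placed hheap) hheap hcur hs
    intro w hw
    simp only [List.mem_cons, List.not_mem_nil, or_false] at hw
    rcases hw with ew | ew | ew | ew
    · rw [ew]
      apply Loose.stack hheap
      · simp only
        omega
      · simp only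
        omega
      · simp only
        omega
    · rw [ew]
      apply Loose.cell hheap hcur
      · simp only
        omega
      · simp only
        omega
    · rw [ew]
      apply Loose.above hheap hcur
      · simp only
        omega
      · simp only
        omega
    · rw [ew]
      apply Loose.shadow hheap hcur.2
      simp only [shadowSpan]
      omega
  · apply rem_sameExcept hs (by omega)
    intro w hw
    simp only [List.mem_cons, List.not_mem_nil, or_false] at hw
    rcases hw with ew | ew | ew | ew
    · rw [ew]
      simp only
      omega
    · rw [ew]
      simp only
      omega
    · rw [ew]
      simp only
      omega
    · rw [ew]
      simp only [shadowSpan]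
      omega
  · apply hlz.sameExcept hs (by omega)
    intro w hw
    simp only [List.mem_cons, List.not_mem_nil, or_false] at hw
    rcases hw with ew | ew | ew | ew
    · rw [ew]
      simp only
      omega
    · rw [ew]
      simp only
      omega
    · rw [ew]
      simp only
      omega
    · rw [ew]
      simp only [shadowSpan]
      omega

/-- **At 10956AH (ret14), `GifMakeMapObject(count, colors)` has returned** (a cut of this unit's own): `Mid` for the heap `H'` of
`MakeMapPost`, the array with room and `rbp = sp`, and the result in `rax` as a map `cm` (`none`: NULL) whose objects are live
in `H'` with bases no object of the forest has. -/
structure seg5_AtRet14 (H : Heap) (rest : List Obj) (frames : List (Nat × FrameLayout)) (F : Forest) (R : Rd)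
    (H' : Heap) (Fc : Forest) (u₀ e : State) (ret : Word) (v : State) : Prop where
  mid : DGifGetImageDesc.Mid Gif.L.DGifGetImageDesc.ret14 H rest frames F R H' Fc u₀ e ret v
  slot : ∃ s : Saved, Fc.saved = some s ∧ s.imgs.length + 1 ≤ s.cap ∧ (v.reg .rbp).toNat = s.arr + 56 * s.imgs.length
  res : ∃ cm : Option Map, MapAt cm (v.reg .rax).toNat v.mem ∧ Owns H' (Map.objs cm ++ Fc.owned)

/-- **109535H … the call of GifMakeMapObject … 10956AH (ret14) when there is a local colour map `mp`** (dgif_lib.c:463-466): the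
checked loads of `gif.Image.ColorMap` (`= mp.obj`, not NULL), of `mp.obj->Colors` and `->ColorCount`; the deep copy
`GifMakeMapObject(mp.count, mp.colors)` at the heap `Hc`. -/
theorem seg5_call (Lay : Layout) (hLay : Lay.hi = 0x1000000) (μ : Microarch) (hμ : UserX.MicroOK μ) (u₀ : State)
    (hcode : HasCodeNat Lay u₀ Gif.L.DGifGetImageDesc.entry Gif.Code.code_DGifGetImageDesc.nat Gif.L.DGifGetImageDesc.size)
    (h_asan_load8_noabort : Asan.SmallCheck Lay μ ProgX.Base.WayInv (ProgX.Base.CodeOK u₀) [.rax, .rcx, .rdx] 8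
      ProgX.Base.L.__asan_load8_noabort.entry)
    (h_asan_load4_noabort : Asan.SmallCheck Lay μ ProgX.Base.WayInv (ProgX.Base.CodeOK u₀) [.rax, .rcx, .rdx] 4
      ProgX.Base.L.__asan_load4_noabort.entry)
    (H : Heap) (rest : List Obj) (frames : List (Nat × FrameLayout)) (F : Forest) (R : Rd) (e : State) (ret : Word)
    (Hc : Heap) (Fc : Forest) (mp : Map)
    (h_make : Calls Lay μ ProgX.Base.WayInv (ProgX.Base.conv u₀) Gif.L.GifMakeMapObject.entry
      (Gif.Spec.GifMakeMapObject.spec Hc rest frames mp.count))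
    (v : State)
    (hat : DGifGetImageDesc.AfterCopy H rest frames F R Hc Fc u₀ e ret v) (hsome : Fc.icm = some mp) :
    ReachVia Lay μ ProgX.Base.WayInv v (fun w => ∃ (H' : Heap), seg5_AtRet14 H rest frames F R H' Fc u₀ e ret w) := by
  -- THE PRELUDE
  obtain ⟨hmid, s, hsaved, hroom, c_rbpn, hslot⟩ := hat
  obtain ⟨hbody, himgs, hlz⟩ := hmid
  have he := hbody.entry
  v_entry he
  obtain ⟨henv, hrdi⟩ := hbody.pre
  have w_rip := hbody.rip
  have c_rsp : v.reg .rsp = e.reg .rsp - 40 := hbody.rsp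
  have c_rbx : v.reg .rbx = e.reg .rdi := hbody.rbx
  have w_kept : RegsKept [.rsp] v v := RegsKept.refl _ _
  have w_eq : Mem.EqOn ProgX.Base.L.textLo ProgX.Base.L.textHi u₀.mem v.mem := ProgX.Base.conv_code_eqOn hbody.code
  have hdf := (show abiInv _ from hbody.abi).1
  have hmx := (show abiInv _ from hbody.abi).2
  have hsse := ProgX.Base.sseOK_of_abiInv hbody.abi
  have k_r13 : v.mem.readLE (e.reg .rsp - 8) 8 = (e.reg .r13).toNat := hbody.slot_r13
  have k_r12 : v.mem.readLE (e.reg .rsp - 16) 8 = (e.reg .r12).toNat := hbody.slot_r12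
  have k_rbp : v.mem.readLE (e.reg .rsp - 24) 8 = (e.reg .rbp).toNat := hbody.slot_rbp
  have k_rbx : v.mem.readLE (e.reg .rsp - 32) 8 = (e.reg .rbx).toNat := hbody.slot_rbx
  have k_ra : UInt64.ofNat (v.mem.readLE (e.reg .rsp) 8) = ret := hbody.slot_ra
  have hsame : Mem.SameExcept
    [⟨(e.reg .rsp).toNat - 496, (e.reg .rsp).toNat⟩,
     ⟨0x800000, 0x1000020⟩,
     ⟨R.cur, R.cur + 8⟩] e.mem v.mem := hbody.same
  -- where the cursor, gif, pv and the map's two objects are, as numbers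
  have hcur := henv.ctx.cursor_range henv.heap.inv.shadow
  have hbase : Hc.base = 0x800000 := hbody.region.1.trans henv.heap.base
  have hlimit : Hc.limit = 0xC00000 := hbody.region.2.trans henv.heap.limit
  have hgif : Fc.gif = F.gif := hbody.forest.1
  have hpveq : Fc.pv = F.pv := hbody.forest.2.1
  have hgin := hbody.ok.owns.inside hbody.inv.heap (o := (Fc.gif, 120)) List.mem_cons_self
  simp only at hgin
  rw [hbase, hgif] at hgin
  have hg1 := hgin.1
  have hg2 := hgin.2.2.2.2
  clear hgin
  have hpv := hbody.ok.owns.inside hbody.inv.heap (o := (Fc.pv, 24936)) (List.mem_cons_of_mem _ List.mem_cons_self)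
  simp only at hpv
  rw [hpveq] at hpv
  have hp1 := hpv.1
  have hp2 := hpv.2.1
  clear hpv
  obtain ⟨hml, hcl, hmne, _⟩ := hbody.ok.icm_live hsome
  have hmo : (mp.obj, 24) ∈ Fc.owned := by
    apply Forest.mem_owned_icm
    rw [hsome]
    exact List.mem_cons_self
  have hmc : (mp.colors, 3 * mp.count) ∈ Fc.owned := by
    apply Forest.mem_owned_icm
    rw [hsome]
    exact List.mem_cons_of_mem _ List.mem_cons_self
  have hmin := hbody.ok.owns.inside hbody.inv.heap hmo
  simp only at hmin
  rw [hbase] at hmin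
  have hm1 := hmin.1
  have hm2 := hmin.2.2.2.2
  clear hmin
  have hcin := hbody.ok.owns.inside hbody.inv.heap hmc
  simp only at hcin
  rw [hbase] at hcin
  have hc1' := hcin.1
  have hc2' := hcin.2.2.2.2
  clear hcin
  have hroomc := hbody.inv.heap.room
  rw [hbase, hlimit] at hroomc
  have hnd := Heap.next_def Hc
  rw [hbase] at hnd
  -- the three loads: `gif.Image.ColorMap = mp.obj`, `mp.obj->Colors = mp.colors`, `mp.obj->ColorCount = mp.count`
  have hicm := hbody.ok.shape.icm
  rw [hsome] at hicm
  obtain ⟨hi1, hi2, hi3, hi4, hi5⟩ := hicm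
  simp only [gfield] at hi1 hi2 hi3
  rw [hgif] at hi1
  have l_icm : v.mem.readLE (e.reg .rdi + 0x40) 8 = mp.obj := by
    rw [rd_eq_readLE v.mem _ (F.gif + 64) 8 (by u_omega)]
    exact hi1
  have l_colors : v.mem.readLE (UInt64.ofNat mp.obj + 0x10) 8 = mp.colors := by
    rw [rd_eq_readLE v.mem _ (mp.obj + 16) 8 (by u_omega)]
    exact hi3
  have l_count : v.mem.readLE (UInt64.ofNat mp.obj) 4 = mp.count := by
    rw [rd_eq_readLE v.mem _ mp.obj 4 (by u_omega)]
    exact hi2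
  have hgl : LiveIn (Hc.liveObjs ++ rest) frames F.gif 120 := by
    rw [← hgif]
    exact hbody.ok.gif_live.liveIn rest _ (Nat.le_refl _) (Nat.le_refl _)
  have hmlive : LiveIn (Hc.liveObjs ++ rest) frames mp.obj 24 := hml.liveIn rest _ (Nat.le_refl _) (Nat.le_refl _)
  u_walk hcode [hμ.vendor] until [Gif.L.DGifGetImageDesc.ret14, Gif.L.DGifGetImageDesc.at_109583]
    span [ProgX.Base.L.textLo, ProgX.Base.L.textHi] side (v_side)
  case check_109539 =>
    -- dgif_lib.c:463 the load of `gif.Image.ColorMap`: 8 bytes inside gif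
    have hun : ShadowUntouched v.mem s_109539.mem := by v_untouched
    exact hgl.accSmall hbody.inv.shadow hun _ 8 (by decide) (by u_omega) (by u_omega)
  case check_10954c =>
    -- dgif_lib.c:466 the load of `mp.obj->Colors`: 8 bytes inside the live map object
    have hun : ShadowUntouched v.mem s_10954c.mem := by v_untouched
    exact hmlive.accSmall hbody.inv.shadow hun _ 8 (by decide) (by u_omega) (by u_omega)
  case check_109559 =>
    -- dgif_lib.c:465 the load of `mp.obj->ColorCount`: 4 bytes inside the live map object
    have hun : ShadowUntouched v.mem s_109559.mem := by v_untouched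
    exact hmlive.accSmall hbody.inv.shadow hun _ 4 (by decide) (by u_omega) (by u_omega)
  case call_inv =>
    v_inv
  case pre_109565 =>
    -- GIFMAKEMAPOBJECT'S PRECONDITION: the heap's for the present heap `Hc` (only the stack below `rsp` was written), the count
    -- of a valid map, the source inside the live colour array
    have hun : ShadowUntouched v.mem s_109565.mem := by v_untouched
    have hs : Mem.SameExcept [⟨(e.reg .rsp).toNat - 48, (e.reg .rsp).toNat - 40⟩] v.mem s_109565.mem := by
      rw [w_mem]
      u_same
    have e_top : (s_109565.reg .rsp).toNat + 8 = (e.reg .rsp).toNat - 40 := by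
      rw [w_rsp]
      u_omega
    have hinv' : HeapInv Hc rest frames ((s_109565.reg .rsp).toNat + 8) s_109565.mem := by
      rw [e_top]
      apply hbody.inv.sameExcept hun hs
      intro w hw
      have ew := List.mem_singleton.mp hw
      rw [ew]
      left
      left
      simp only
      omega
    refine ⟨hbody.region.heapPre henv.heap hinv', ?_, hi5, Or.inr ?_⟩
    · rw [w_rdi, toNat_ofBV32, BitVec.toNat_ofNat]
      omega
    · rw [w_rsi, toNat_ofNat_addr mp.colors (by omega)]
      exact hcl.liveIn rest _ (Nat.le_refl _) (Nat.le_refl _)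
  -- 0x10956a (ret14): GIFMAKEMAPOBJECT HAS RETURNED. Its post: the grown heap `H'`, NULL or the new map
  obtain ⟨H', hgrew, hinv1, hres⟩ : MakeMapPost Hc rest frames mp.count s_109565 s_109565r := w_post
  have e_top : (s_109565.reg .rsp).toNat + 8 = (e.reg .rsp).toNat - 40 := by
    rw [w_rsp_109565]
    u_omega
  rw [e_top] at hinv1
  -- the callee's footprint in terms of `v`
  v_after_call w_rsp_109565 w_mem_109565
  simp only [shadowSpan] at w_same
  -- THE SLOTS AND THE RETURN ADDRESS, over the pushed return address (first step) and through the callee's footprint (second)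
  have hp13 : s_109565.mem.readLE (e.reg .rsp - 8) 8 = (e.reg .r13).toNat := by
    rw [w_mem_109565]
    u_frame k_r13
  rw [w_mem_109565] at hp13
  have hs13 : s_109565r.mem.readLE (e.reg .rsp - 8) 8 = (e.reg .r13).toNat := by u_frame hp13
  have hp12 : s_109565.mem.readLE (e.reg .rsp - 16) 8 = (e.reg .r12).toNat := by
    rw [w_mem_109565]
    u_frame k_r12
  rw [w_mem_109565] at hp12
  have hs12 : s_109565r.mem.readLE (e.reg .rsp - 16) 8 = (e.reg .r12).toNat := by u_frame hp12
  have hpbp : s_109565.mem.readLE (e.reg .rsp - 24) 8 = (e.reg .rbp).toNat := by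
    rw [w_mem_109565]
    u_frame k_rbp
  rw [w_mem_109565] at hpbp
  have hsbp : s_109565r.mem.readLE (e.reg .rsp - 24) 8 = (e.reg .rbp).toNat := by u_frame hpbp
  have hpbx : s_109565.mem.readLE (e.reg .rsp - 32) 8 = (e.reg .rbx).toNat := by
    rw [w_mem_109565]
    u_frame k_rbx
  rw [w_mem_109565] at hpbx
  have hsbx : s_109565r.mem.readLE (e.reg .rsp - 32) 8 = (e.reg .rbx).toNat := by u_frame hpbx
  have hpra : UInt64.ofNat (s_109565.mem.readLE (e.reg .rsp) 8) = ret := by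
    rw [w_mem_109565]
    u_frame k_ra
  rw [w_mem_109565] at hpra
  have hsra : UInt64.ofNat (s_109565r.mem.readLE (e.reg .rsp) 8) = ret := by u_frame hpra
  -- the footprint since `v` (what the state invariant is carried through; the shadow span as numbers for `u_same`) …
  have hsv : Mem.SameExcept
    [⟨(e.reg .rsp).toNat - 496, (e.reg .rsp).toNat - 40⟩,
     ⟨0x800000, 0x800008⟩,
     ⟨Hc.next - 32, 0xC00000⟩,
     ⟨0xC00000 + (Hc.next - 32) / 8, 0xC00000 + (0xC00000 + 7) / 8⟩] v.mem s_109565r.mem := by u_same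
  -- … and since the entry
  have hsame1 : Mem.SameExcept
    [⟨(e.reg .rsp).toNat - 496, (e.reg .rsp).toNat⟩,
     ⟨0x800000, 0x1000020⟩,
     ⟨R.cur, R.cur + 8⟩] e.mem s_109565r.mem := by u_same
  -- the state invariant's shape, the reader's measure and the LZW ranges through the callee's footprint
  obtain ⟨hshape1, hrem1, hlz1⟩ := seg5_through_make (lo := (e.reg .rsp).toNat - 496) (top := (e.reg .rsp).toNat - 40)
    hbody.ok hbody.inv.heap hbase hlimit ⟨hcur.1, hcur.2.1⟩ (by omega) (by omega) (by omega) hp2 hlz hsv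
  have hok1 : GifOK H' Fc R s_109565r.mem := ⟨hbody.ok.owns.grew hgrew, hshape1⟩
  -- THE EXIT ASSERTION: `At` at `ret14` for the heap `H'` …
  have hat1 : DGifGetImageDesc.At Gif.L.DGifGetImageDesc.ret14 H rest frames F R H' Fc u₀ e ret s_109565r := {
    entry := hbody.entry
    pre := hbody.pre
    rip := w_rip
    rsp := w_rsp
    rbx := (w_kept.get .rbx rfl).trans hbody.rbx
    r14 := (w_kept.get .r14 rfl).trans hbody.r14
    r15 := (w_kept.get .r15 rfl).trans hbody.r15
    slot_r13 := hs13
    slot_r12 := hs12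
    slot_rbp := hsbp
    slot_rbx := hsbx
    slot_ra := hsra
    inv := hinv1
    region := hbody.region.trans hgrew.region
    forest := hbody.forest
    ok := hok1
    rem := by
      rw [hrem1]
      exact hbody.rem
    same := hsame1
    code := w_code
    abi := w_inv
  }
  refine ReachVia.done ⟨H', ⟨hat1, himgs, hlz1⟩, ⟨s, hsaved, hroom, ?_⟩, ?_⟩
  · rw [w_kept.get .rbp rfl]
    exact c_rbpn
  · -- … and the result as a map
    rcases hres with hnull | ⟨colors, hl1, hl2, hn1, hn2, hne, hcnt, hcol, hc2, hc256⟩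
    · exact ⟨none, hnull, hok1.owns⟩
    · refine ⟨some ⟨(s_109565r.reg .rax).toNat, colors, mp.count⟩, ⟨rfl, hcnt, hcol, by omega, hc256⟩, ?_⟩
      have h1 : Owns H' ((colors, 3 * mp.count) :: Fc.owned) :=
        hbody.ok.owns.cons_grew hbody.inv.heap hgrew hl2 hn2
      refine h1.cons hl1 ?_
      intro x hx ex
      rcases List.mem_cons.mp hx with e1 | hin
      · rw [e1] at ex
        exact hne ex.symm
      · obtain ⟨cx, hlx⟩ := hbody.ok.owns.live x hin
        have hab := hbody.inv.heap.next_above hlx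
        simp only at hab ex
        omega

/-- **A store into the uncounted slot of the SavedImages array** (`[arr + 56 · length, arr + 56 · cap)`, a loose `tail` window) keeps
the heap's invariant, the state invariant, the reader's measure and the LZW ranges (the array is not pv). -/
theorem seg5_store_slot {H : Heap} {rest : List Obj} {frames : List (Nat × FrameLayout)} {F : Forest} {R : Rd} {top : Nat}
    {mem : Mem} (hinv : HeapInv H rest frames top mem) (hok : GifOK H F R mem)
    (hcur : 0x700000 ≤ R.cur ∧ R.cur + 16 ≤ 0x800000) {s : Saved} (hs : F.saved = some s) (a : Word) (k val : Nat)
    (h1 : s.arr + 56 * s.imgs.length ≤ a.toNat) (h2 : a.toNat + k ≤ s.arr + 56 * s.cap) (hlz : LZOK mem F.pv) :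
    HeapInv H rest frames top (mem.writeLE a k val) ∧ GifOK H F R (mem.writeLE a k val) ∧
      rem R (mem.writeLE a k val) = rem R mem ∧ LZOK (mem.writeLE a k val) F.pv := by
  have hown : (s.arr, 56 * s.cap) ∈ F.owned := by
    apply Forest.mem_owned_saved
    rw [hs]
    exact List.mem_cons_self
  have hpvown : (F.pv, 24936) ∈ F.owned := List.mem_cons_of_mem _ List.mem_cons_self
  have hstruct : (s.arr, 56 * s.imgs.length) ∈ F.structs := by
    apply carry_mem_structs_saved
    rw [hs]
    exact List.mem_cons_self
  have hne : s.arr ≠ F.pv := ((hok.owns.placed hinv.heap).structs_ne.1 _ hstruct).2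
  have hfar := hok.owns.far hinv.heap hown hpvown (fun ep => hne (congrArg Prod.fst ep))
  have hsin := hok.owns.inside hinv.heap hown
  simp only at hfar hsin
  have hs5 := hsin.2.2.2.2
  clear hsin
  have hpin := hok.owns.inside hinv.heap hpvown
  simp only at hpin
  have hp5 := hpin.2.2.2.2
  clear hpin
  have hsx : Mem.SameExcept [⟨a.toNat, a.toNat + k⟩] mem (mem.writeLE a k val) :=
    Mem.SameExcept.writeLE _ mem a k val (by omega) ⟨_, List.mem_cons_self, Nat.le_refl _, Nat.le_refl _⟩
  have hloose : ∀ w, w ∈ [(⟨a.toNat, a.toNat + k⟩ : Span)] → Loose H F R w := by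
    intro w hw
    have ew := List.mem_singleton.mp hw
    rw [ew]
    exact (Loose.savedTail hinv.heap hok.owns hs h1 h2).1
  refine ⟨hinv.writeLE_live (hok.owns.live _ hown) a k val (by simp only; omega) h2, ?_, ?_, ?_⟩
  · exact hok.sameExcept hinv.heap hcur hsx hloose
  · exact rem_loose hsx hloose hinv.heap (hok.owns.placed hinv.heap) hcur
  · apply hlz.sameExcept hsx (by omega)
    intro w hw
    have ew := List.mem_singleton.mp hw
    rw [ew]
    simp only
    omega

/-- **`LZOK` through a store into the stack** (the return address a check call pushes): pv lies in the heap's region. -/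
theorem seg5_lz_stack {mem : Mem} {pv : Nat} (hlz : LZOK mem pv) (a : Word) (k val : Nat) (hpv : 0x800000 ≤ pv)
    (hpv2 : pv + 48 < 2 ^ 64) (h2 : a.toNat + k ≤ 0x800000) : LZOK (mem.writeLE a k val) pv := by
  have hsx : Mem.SameExcept [⟨a.toNat, a.toNat + k⟩] mem (mem.writeLE a k val) :=
    Mem.SameExcept.writeLE _ mem a k val (by omega) ⟨_, List.mem_cons_self, Nat.le_refl _, Nat.le_refl _⟩
  apply hlz.sameExcept hsx hpv2
  intro w hw
  have ew := List.mem_singleton.mp hw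
  rw [ew]
  simp only
  omega

/-- **10956AH (ret14) … 109583H when the deep copy succeeded** (dgif_lib.c:464, 467): `r12 = rax`, the checked store of the new map
to `sp->ImageDesc.ColorMap` (a `tail` window of the array), `test r12, r12 ; je` not taken. The slot's map is the copy `m`. -/
theorem seg5_tail_map (Lay : Layout) (hLay : Lay.hi = 0x1000000) (μ : Microarch) (hμ : UserX.MicroOK μ) (u₀ : State)
    (hcode : HasCodeNat Lay u₀ Gif.L.DGifGetImageDesc.entry Gif.Code.code_DGifGetImageDesc.nat Gif.L.DGifGetImageDesc.size)
    (h_asan_store8_noabort : Asan.SmallCheck Lay μ ProgX.Base.WayInv (ProgX.Base.CodeOK u₀) [.rax, .rcx, .rdx] 8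
      ProgX.Base.L.__asan_store8_noabort.entry)
    (H : Heap) (rest : List Obj) (frames : List (Nat × FrameLayout)) (F : Forest) (R : Rd) (e : State) (ret : Word)
    (Hc : Heap) (Fc : Forest) (v : State) (s : Saved) (m : Map)
    (hmid : DGifGetImageDesc.Mid Gif.L.DGifGetImageDesc.ret14 H rest frames F R Hc Fc u₀ e ret v)
    (hsaved : Fc.saved = some s) (hroom : s.imgs.length + 1 ≤ s.cap)
    (c_rbpn : (v.reg .rbp).toNat = s.arr + 56 * s.imgs.length)
    (hmap : MapAt (some m) (v.reg .rax).toNat v.mem) (hown : Owns Hc (Map.objs (some m) ++ Fc.owned)) :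
    ReachVia Lay μ ProgX.Base.WayInv v (fun w =>
      (∃ (H' : Heap), DGifGetImageDesc.Slot H rest frames F R H' Fc u₀ e ret w) ∨
      (∃ (H' : Heap), DGifGetImageDesc.Done H rest frames F R H' Fc u₀ e ret w)) := by
  -- THE PRELUDE
  obtain ⟨hbody, himgs, hlz⟩ := hmid
  have he := hbody.entry
  v_entry he
  obtain ⟨henv, hrdi⟩ := hbody.pre
  have w_rip := hbody.rip
  have c_rsp : v.reg .rsp = e.reg .rsp - 40 := hbody.rsp
  have c_rbx : v.reg .rbx = e.reg .rdi := hbody.rbx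
  -- `rax` (the new map) and `rbp` (the slot) as variables
  obtain ⟨z, c_rax⟩ : ∃ z, v.reg .rax = z := ⟨_, rfl⟩
  obtain ⟨b, c_rbp⟩ : ∃ b, v.reg .rbp = b := ⟨_, rfl⟩
  rw [c_rax] at hmap
  rw [c_rbp] at c_rbpn
  have w_kept : RegsKept [.rsp] v v := RegsKept.refl _ _
  have w_eq : Mem.EqOn ProgX.Base.L.textLo ProgX.Base.L.textHi u₀.mem v.mem := ProgX.Base.conv_code_eqOn hbody.code
  have hdf := (show abiInv _ from hbody.abi).1
  have hmx := (show abiInv _ from hbody.abi).2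
  have hsse := ProgX.Base.sseOK_of_abiInv hbody.abi
  have k_r13 : v.mem.readLE (e.reg .rsp - 8) 8 = (e.reg .r13).toNat := hbody.slot_r13
  have k_r12 : v.mem.readLE (e.reg .rsp - 16) 8 = (e.reg .r12).toNat := hbody.slot_r12
  have k_rbp : v.mem.readLE (e.reg .rsp - 24) 8 = (e.reg .rbp).toNat := hbody.slot_rbp
  have k_rbx : v.mem.readLE (e.reg .rsp - 32) 8 = (e.reg .rbx).toNat := hbody.slot_rbx
  have k_ra : UInt64.ofNat (v.mem.readLE (e.reg .rsp) 8) = ret := hbody.slot_ra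
  have hsame : Mem.SameExcept
    [⟨(e.reg .rsp).toNat - 496, (e.reg .rsp).toNat⟩,
     ⟨0x800000, 0x1000020⟩,
     ⟨R.cur, R.cur + 8⟩] e.mem v.mem := hbody.same
  -- where the cursor, the array and the new map are, as numbers
  have hcur := henv.ctx.cursor_range henv.heap.inv.shadow
  have hbase : Hc.base = 0x800000 := hbody.region.1.trans henv.heap.base
  have hgif : Fc.gif = F.gif := hbody.forest.1
  have hpveq : Fc.pv = F.pv := hbody.forest.2.1
  have hao : (s.arr, 56 * s.cap) ∈ Fc.owned := by
    apply Forest.mem_owned_saved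
    rw [hsaved]
    exact List.mem_cons_self
  have hsin := hbody.ok.owns.inside hbody.inv.heap hao
  simp only at hsin
  rw [hbase] at hsin
  have hs1 := hsin.1
  have hs2 := hsin.2.2.2.2
  clear hsin
  obtain ⟨hm1, hm2, hm3, hm4, hm5⟩ := hmap
  have hmo : (m.obj, 24) ∈ Map.objs (some m) ++ Fc.owned := List.mem_append_left _ List.mem_cons_self
  have hmin := hown.inside hbody.inv.heap hmo
  simp only at hmin
  rw [hbase] at hmin
  have hmo1 := hmin.1
  have hmo2 := hmin.2.2.2.2
  clear hmin
  have harl : LiveIn (Hc.liveObjs ++ rest) frames s.arr (56 * s.cap) :=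
    (hbody.ok.owns.live _ hao).liveIn rest _ (Nat.le_refl _) (Nat.le_refl _)
  u_walk hcode [hμ.vendor] until [Gif.L.DGifGetImageDesc.at_109583, Gif.L.DGifGetImageDesc.at_10949a]
    span [ProgX.Base.L.textLo, ProgX.Base.L.textHi] side (v_side)
  case check_109571 =>
    -- dgif_lib.c:464 the store of `sp->ImageDesc.ColorMap`: 8 bytes inside the uncounted slot of the live array
    have hun : ShadowUntouched v.mem s_109571.mem := by v_untouched
    exact harl.accSmall hbody.inv.shadow hun _ 8 (by decide) (by u_omega) (by u_omega)
  -- 0x109583 FROM 0x10957d: two stores since `v`: the check call's return address (stack), then the slot's field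
  have hpvown : (Fc.pv, 24936) ∈ Fc.owned := List.mem_cons_of_mem _ List.mem_cons_self
  have hpin := hbody.ok.owns.inside hbody.inv.heap hpvown
  simp only at hpin
  rw [hbase] at hpin
  have hp1 := hpin.1
  have hp2 := hpin.2.2.2.2
  clear hpin
  rw [← hpveq] at hlz
  obtain ⟨hinvA, hokA, hremA⟩ := store_stack hbody.inv hbody.ok ⟨hcur.1, hcur.2.1⟩ (e.reg .rsp - 48) 8 1086838
    (by u_omega) (by u_omega)
  have hlzA := seg5_lz_stack hlz (e.reg .rsp - 48) 8 1086838 (by omega) (by omega) (by u_omega)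
  obtain ⟨hinvB, hokB, hremB, hlzB⟩ := seg5_store_slot hinvA hokA ⟨hcur.1, hcur.2.1⟩ hsaved (b + 24) 8 z.toNat
    (by u_omega) (by u_omega) hlzA
  rw [← w_mem] at hinvB hokB hremB hlzB
  rw [hpveq] at hlzB
  have hremF : rem R s_10957d.mem = rem R v.mem := hremB.trans hremA
  have hs2 : Mem.SameExcept
    [⟨(e.reg .rsp).toNat - 48, (e.reg .rsp).toNat - 40⟩,
     ⟨s.arr + 56 * s.imgs.length + 24, s.arr + 56 * s.imgs.length + 32⟩] v.mem s_10957d.mem := by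
    rw [w_mem]
    u_same
  -- the new map's object is not the array: 64 bytes apart
  obtain ⟨_, _, hne⟩ := hown.of_cons
  have hfar := hown.far hbody.inv.heap hmo (List.mem_append_right _ hao)
    (fun ep => hne _ (List.mem_cons_of_mem _ hao) (congrArg Prod.fst ep))
  simp only at hfar
  have hat1 : DGifGetImageDesc.At Gif.L.DGifGetImageDesc.at_109583 H rest frames F R Hc Fc u₀ e ret s_10957d := {
    entry := hbody.entry
    pre := hbody.pre
    rip := w_rip
    rsp := w_rsp
    rbx := (w_kept.get .rbx rfl).trans hbody.rbx
    r14 := (w_kept.get .r14 rfl).trans hbody.r14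
    r15 := (w_kept.get .r15 rfl).trans hbody.r15
    slot_r13 := by
      rw [w_mem]
      u_frame k_r13
    slot_r12 := by
      rw [w_mem]
      u_frame k_r12
    slot_rbp := by
      rw [w_mem]
      u_frame k_rbp
    slot_rbx := by
      rw [w_mem]
      u_frame k_rbx
    slot_ra := by
      rw [w_mem]
      u_frame k_ra
    inv := hinvB
    region := hbody.region
    forest := hbody.forest
    ok := hokB
    rem := by
      rw [hremF]
      exact hbody.rem
    same := by
      rw [w_mem]
      u_same
    code := ProgX.Base.conv_code_in w_eq
    abi := by
      refine ProgX.Base.abiInv_of ?_ ?_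
      · rw [w_flags]
        simp only [X86.User.df_setStatus]
        exact w_df_109571
      · rw [w_mxcsr]
        exact hmx
  }
  refine ReachVia.done (Or.inl ⟨Hc, ⟨hat1, himgs, hlzB⟩, s, some m, hsaved, hroom, ?_, ?_, hown⟩)
  · rw [w_kept.get .rbp rfl, c_rbp]
    exact c_rbpn
  · -- the slot's field holds the new map, whose object the two stores did not touch
    have hfield : SavedImage.ImageDesc.ColorMap s_10957d.mem (s.arr + 56 * s.imgs.length) = z.toNat := by
      simp only [gfield]
      rw [w_mem, rd_writeLE_same _ (b + 24) 8 z.toNat _ (by u_omega) (by decide)]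
      have hz := z.toNat_lt
      simp only [Nat.reducePow] at hz ⊢
      omega
    rw [hfield]
    have hmapv : MapAt (some m) z.toNat v.mem := ⟨hm1, hm2, hm3, hm4, hm5⟩
    apply hmapv.frame
    · intro o ho
      simp only [Map.structs, List.mem_singleton] at ho
      rw [ho]
      apply hs2.eqOn
      intro w hw
      simp only [List.mem_cons, List.not_mem_nil, or_false] at hw
      rcases hw with ew | ew
      · rw [ew]
        simp only
        omega
      · rw [ew]
        simp only
        omega
    · intro x hx
      have ex : x = m := (Option.some.inj hx).symm
      rw [ex]
      omega

/-- **10956AH (ret14) … 10949AH when the deep copy failed** (dgif_lib.c:464, 467-469): `r12 = rax = NULL`, the checked store of NULL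
to `sp->ImageDesc.ColorMap`, `je` taken to 10961EH: the checked store of `gif.Error = D_GIF_ERR_NOT_ENOUGH_MEM`, `ebp = 0`, to the
shared exit. The slot is not counted: the same forest, the same counted images. -/
theorem seg5_tail_null (Lay : Layout) (hLay : Lay.hi = 0x1000000) (μ : Microarch) (hμ : UserX.MicroOK μ) (u₀ : State)
    (hcode : HasCodeNat Lay u₀ Gif.L.DGifGetImageDesc.entry Gif.Code.code_DGifGetImageDesc.nat Gif.L.DGifGetImageDesc.size)
    (h_asan_store8_noabort : Asan.SmallCheck Lay μ ProgX.Base.WayInv (ProgX.Base.CodeOK u₀) [.rax, .rcx, .rdx] 8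
      ProgX.Base.L.__asan_store8_noabort.entry)
    (h_asan_store4_noabort : Asan.SmallCheck Lay μ ProgX.Base.WayInv (ProgX.Base.CodeOK u₀) [.rax, .rcx, .rdx] 4
      ProgX.Base.L.__asan_store4_noabort.entry)
    (H : Heap) (rest : List Obj) (frames : List (Nat × FrameLayout)) (F : Forest) (R : Rd) (e : State) (ret : Word)
    (Hc : Heap) (Fc : Forest) (v : State) (s : Saved)
    (hmid : DGifGetImageDesc.Mid Gif.L.DGifGetImageDesc.ret14 H rest frames F R Hc Fc u₀ e ret v)
    (hsaved : Fc.saved = some s) (hroom : s.imgs.length + 1 ≤ s.cap)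
    (c_rbpn : (v.reg .rbp).toNat = s.arr + 56 * s.imgs.length)
    (hnull : (v.reg .rax).toNat = 0) :
    ReachVia Lay μ ProgX.Base.WayInv v (fun w =>
      (∃ (H' : Heap), DGifGetImageDesc.Slot H rest frames F R H' Fc u₀ e ret w) ∨
      (∃ (H' : Heap), DGifGetImageDesc.Done H rest frames F R H' Fc u₀ e ret w)) := by
  -- THE PRELUDE
  obtain ⟨hbody, himgs, hlz⟩ := hmid
  have he := hbody.entry
  v_entry he
  obtain ⟨henv, hrdi⟩ := hbody.pre
  have w_rip := hbody.rip
  have c_rsp : v.reg .rsp = e.reg .rsp - 40 := hbody.rsp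
  have c_rbx : v.reg .rbx = e.reg .rdi := hbody.rbx
  -- `rax` (NULL) and `rbp` (the slot) as variables
  obtain ⟨z, c_rax⟩ : ∃ z, v.reg .rax = z := ⟨_, rfl⟩
  obtain ⟨b, c_rbp⟩ : ∃ b, v.reg .rbp = b := ⟨_, rfl⟩
  rw [c_rax] at hnull
  rw [c_rbp] at c_rbpn
  have w_kept : RegsKept [.rsp] v v := RegsKept.refl _ _
  have w_eq : Mem.EqOn ProgX.Base.L.textLo ProgX.Base.L.textHi u₀.mem v.mem := ProgX.Base.conv_code_eqOn hbody.code
  have hdf := (show abiInv _ from hbody.abi).1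
  have hmx := (show abiInv _ from hbody.abi).2
  have hsse := ProgX.Base.sseOK_of_abiInv hbody.abi
  have k_r13 : v.mem.readLE (e.reg .rsp - 8) 8 = (e.reg .r13).toNat := hbody.slot_r13
  have k_r12 : v.mem.readLE (e.reg .rsp - 16) 8 = (e.reg .r12).toNat := hbody.slot_r12
  have k_rbp : v.mem.readLE (e.reg .rsp - 24) 8 = (e.reg .rbp).toNat := hbody.slot_rbp
  have k_rbx : v.mem.readLE (e.reg .rsp - 32) 8 = (e.reg .rbx).toNat := hbody.slot_rbx
  have k_ra : UInt64.ofNat (v.mem.readLE (e.reg .rsp) 8) = ret := hbody.slot_ra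
  have hsame : Mem.SameExcept
    [⟨(e.reg .rsp).toNat - 496, (e.reg .rsp).toNat⟩,
     ⟨0x800000, 0x1000020⟩,
     ⟨R.cur, R.cur + 8⟩] e.mem v.mem := hbody.same
  -- where the cursor, gif and the array are, as numbers
  have hcur := henv.ctx.cursor_range henv.heap.inv.shadow
  have hbase : Hc.base = 0x800000 := hbody.region.1.trans henv.heap.base
  have hgif : Fc.gif = F.gif := hbody.forest.1
  have hpveq : Fc.pv = F.pv := hbody.forest.2.1
  have hgin := hbody.ok.owns.inside hbody.inv.heap (o := (Fc.gif, 120)) List.mem_cons_self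
  simp only at hgin
  rw [hbase, hgif] at hgin
  have hg1 := hgin.1
  have hg2 := hgin.2.2.2.2
  clear hgin
  have hao : (s.arr, 56 * s.cap) ∈ Fc.owned := by
    apply Forest.mem_owned_saved
    rw [hsaved]
    exact List.mem_cons_self
  have hsin := hbody.ok.owns.inside hbody.inv.heap hao
  simp only at hsin
  rw [hbase] at hsin
  have hs1 := hsin.1
  have hs2 := hsin.2.2.2.2
  clear hsin
  have harl : LiveIn (Hc.liveObjs ++ rest) frames s.arr (56 * s.cap) :=
    (hbody.ok.owns.live _ hao).liveIn rest _ (Nat.le_refl _) (Nat.le_refl _)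
  have hgl : LiveIn (Hc.liveObjs ++ rest) frames F.gif 120 := by
    rw [← hgif]
    exact hbody.ok.gif_live.liveIn rest _ (Nat.le_refl _) (Nat.le_refl _)
  u_walk hcode [hμ.vendor] until [Gif.L.DGifGetImageDesc.at_109583, Gif.L.DGifGetImageDesc.at_10949a]
    span [ProgX.Base.L.textLo, ProgX.Base.L.textHi] side (v_side)
  case check_109571 =>
    -- dgif_lib.c:464 the store of `sp->ImageDesc.ColorMap`: 8 bytes inside the uncounted slot of the live array
    have hun : ShadowUntouched v.mem s_109571.mem := by v_untouched
    exact harl.accSmall hbody.inv.shadow hun _ 8 (by decide) (by u_omega) (by u_omega)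
  case check_109622 =>
    -- dgif_lib.c:468 the store of `gif.Error`: 4 bytes inside gif
    have hun : ShadowUntouched v.mem s_109622.mem := by v_untouched
    exact hgl.accSmall hbody.inv.shadow hun _ 4 (by decide) (by u_omega) (by u_omega)
  -- 0x10949a FROM 0x109633: four stores since `v`: a return address, the slot's field, a return address, `gif.Error`
  have hpvown : (Fc.pv, 24936) ∈ Fc.owned := List.mem_cons_of_mem _ List.mem_cons_self
  have hpin := hbody.ok.owns.inside hbody.inv.heap hpvown
  simp only at hpin
  rw [hbase] at hpin
  have hp1 := hpin.1
  have hp2 := hpin.2.2.2.2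
  clear hpin
  rw [← hpveq] at hlz
  obtain ⟨hinvA, hokA, hremA⟩ := store_stack hbody.inv hbody.ok ⟨hcur.1, hcur.2.1⟩ (e.reg .rsp - 48) 8 1086838
    (by u_omega) (by u_omega)
  have hlzA := seg5_lz_stack hlz (e.reg .rsp - 48) 8 1086838 (by omega) (by omega) (by u_omega)
  obtain ⟨hinvB, hokB, hremB, _⟩ := seg5_store_slot hinvA hokA ⟨hcur.1, hcur.2.1⟩ hsaved (b + 24) 8 z.toNat
    (by u_omega) (by u_omega) hlzA
  obtain ⟨hinvC, hokC, hremC⟩ := store_stack hinvB hokB ⟨hcur.1, hcur.2.1⟩ (e.reg .rsp - 48) 8 1087015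
    (by u_omega) (by u_omega)
  obtain ⟨hinvD, hokD, hremD⟩ := store_gif hinvC hokC ⟨hcur.1, hcur.2.1⟩ hbase (e.reg .rdi + 96) 4 109
    (Or.inr (Or.inr (by rw [hgif]; u_omega)))
  rw [← w_mem] at hinvD hokD hremD
  have hremF : rem R s_109633.mem = rem R v.mem := ((hremD.trans hremC).trans hremB).trans hremA
  have hat1 : DGifGetImageDesc.At Gif.L.DGifGetImageDesc.at_10949a H rest frames F R Hc Fc u₀ e ret s_109633 := {
    entry := hbody.entry
    pre := hbody.pre
    rip := w_rip
    rsp := w_rsp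
    rbx := (w_kept.get .rbx rfl).trans hbody.rbx
    r14 := (w_kept.get .r14 rfl).trans hbody.r14
    r15 := (w_kept.get .r15 rfl).trans hbody.r15
    slot_r13 := by
      rw [w_mem]
      u_frame k_r13
    slot_r12 := by
      rw [w_mem]
      u_frame k_r12
    slot_rbp := by
      rw [w_mem]
      u_frame k_rbp
    slot_rbx := by
      rw [w_mem]
      u_frame k_rbx
    slot_ra := by
      rw [w_mem]
      u_frame k_ra
    inv := hinvD
    region := hbody.region
    forest := hbody.forest
    ok := hokD
    rem := by
      rw [hremF]
      exact hbody.rem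
    same := by
      rw [w_mem]
      u_same
    code := ProgX.Base.conv_code_in w_eq
    abi := by
      refine ProgX.Base.abiInv_of ?_ ?_
      · rw [w_flags]
        exact w_df_109622
      · rw [w_mxcsr]
        exact hmx
  }
  -- GIF_ERROR in `ebp`; the counted images are the entry's
  have hres : (s_109633.reg .rbp).toNat % 2 ^ 32 = 0 := by
    rw [w_rbp]
    decide
  refine ReachVia.done (Or.inr ⟨Hc, hat1, Or.inr hres, ?_, fun _ => himgs⟩)
  intro h1
  rw [hres] at h1
  exact absurd h1 (by decide)

end Gif.Spec.DGifGetImageDesc_5
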